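-- pv_equiv track=rewrite | github.com/mikaelvincent/intrinsic-rl | code/irl/visualization/paper/tables.py | _ensure_glpe_nogate_in_groups
-- ===== SOURCE A (Python) =====
-- from typing import Sequence
--
-- def _ensure_glpe_nogate_in_groups(
--     baselines: Sequence[str],
--     ablations: Sequence[str],
-- ) -> tuple[list[str], list[str]]:
--     b: list[str] = []
--     a: list[str] = []
--
--     seen_b: set[str] = set()
--     for m in baselines:
--         k = str(m).strip().lower()
--         if not k or k in seen_b:
--             continue
--         b.append(k)
--         seen_b.add(k)
--
--     seen_a: set[str] = set()
--     for m in ablations: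
--         k = str(m).strip().lower()
--         if not k or k in seen_a:
--             continue
--         a.append(k)
--         seen_a.add(k)
--
--     for k in ("glpe", "glpe_nogate"):
--         if k not in seen_b:
--             b.append(k)
--             seen_b.add(k)
--         if k not in seen_a:
--             a.append(k)
--             seen_a.add(k)
--
--     return b, a
-- ===== SOURCE B (Python) =====
-- def _dedup_back(keys):
--     # Build the order back-to-front: walk the keys from the RIGHT doing a move-to-front
--     # on a dict (drop the key's old slot, re-add it at the end), then reverse.
--     mtf = {}
--     for head in reversed(keys):
--         if head:
--             mtf.pop(head, None)
--             mtf[head] = None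
--     return [*reversed(mtf)]
--
--
-- def _ensure_glpe_nogate_in_groups(baselines, ablations):
--     def group(items):
--         return _dedup_back([str(m).strip().lower() for m in items] + ["glpe", "glpe_nogate"])
--     return group(baselines), group(ablations)
-- ===== Notes on version B (the rewrite author's own statement) =====
-- stated objective: alternative
-- what changed: Replaces A's forward loops with seen-sets plus a separate ensure-present loop by a right-to-left move-to-front pass: the required keys are appended to the normalized key list, the list is walked from the right re-slotting each nonempty key to the end of a dict, and the reversed key order is returned, with no seen set and no ensure phase.
import Mathlib
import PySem

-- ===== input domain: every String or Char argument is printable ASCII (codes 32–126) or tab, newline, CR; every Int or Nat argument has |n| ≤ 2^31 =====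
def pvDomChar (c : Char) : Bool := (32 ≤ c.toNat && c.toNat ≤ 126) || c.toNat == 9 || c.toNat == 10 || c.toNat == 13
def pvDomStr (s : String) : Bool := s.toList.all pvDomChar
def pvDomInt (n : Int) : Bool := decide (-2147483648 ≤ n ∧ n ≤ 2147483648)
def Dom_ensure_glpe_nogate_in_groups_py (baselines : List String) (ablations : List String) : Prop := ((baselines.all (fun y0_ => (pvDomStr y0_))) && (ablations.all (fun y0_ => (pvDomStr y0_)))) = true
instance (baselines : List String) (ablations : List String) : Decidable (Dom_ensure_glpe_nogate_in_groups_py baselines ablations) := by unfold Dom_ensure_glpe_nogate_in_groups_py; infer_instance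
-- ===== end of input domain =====

-- B replaces A's forward seen-set loops plus a separate ensure-present loop by a right-to-left
-- rebuild over the normalized keys with the two required keys appended (alternative decomposition).

-- ===== PORT A =====
-- phase-1 loop of A: state is (out list, seen set); k = str(m).strip().lower()
def pvLoopA (xs : List String) (st : List String × PySem.Set String) :
    List String × PySem.Set String :=
  xs.foldl (fun st m =>
    let k := PySem.Str.lower (PySem.Str.strip m)
    if k == "" || PySem.Set.contains st.2 k then st
    else (st.1 ++ [k], PySem.Set.add st.2 k)) st

-- the ensure loop body for one of the two (list, seen) pairs: 'if k not in seen: append; add'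
def pvEnsure (p : List String × PySem.Set String) (k : String) :
    List String × PySem.Set String :=
  if PySem.Set.contains p.2 k then p else (p.1 ++ [k], PySem.Set.add p.2 k)

def ensure_glpe_nogate_in_groups_py (baselines : List String) (ablations : List String) :
    List String × List String :=
  let stb := pvLoopA baselines ([], PySem.Set.empty)
  let sta := pvLoopA ablations ([], PySem.Set.empty)
  let fin := (["glpe", "glpe_nogate"]).foldl (fun st k => (pvEnsure st.1 k, pvEnsure st.2 k)) (stb, sta)
  (fin.1.1, fin.2.1)

-- ===== PORT B =====
-- _dedup_back: walk the keys from the RIGHT doing a move-to-front on a dict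
-- (mtf.pop(head, None); mtf[head] = None = erase then insert), then reverse the keys
def pvDedupBack (keys : List String) : List String :=
  (keys.reverse.foldl
    (fun mtf head => if head == "" then mtf
      else (PySem.Dict.erase mtf head).insert head (none : Option Unit))
    PySem.Dict.empty).keys.reverse

def ensure_glpe_nogate_in_groups_py_alt (baselines : List String) (ablations : List String) :
    List String × List String :=
  (pvDedupBack ((baselines.map (fun m => PySem.Str.lower (PySem.Str.strip m))) ++ ["glpe", "glpe_nogate"]),
   pvDedupBack ((ablations.map (fun m => PySem.Str.lower (PySem.Str.strip m))) ++ ["glpe", "glpe_nogate"]))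

-- ===== PRECONDITION & SPEC =====
def Spec_ensure_glpe_nogate_in_groups_py (baselines : List String) (ablations : List String) (out : List String × List String) : Prop := out = ensure_glpe_nogate_in_groups_py_alt baselines ablations
instance (baselines : List String) (ablations : List String) (out : List String × List String) : Decidable (Spec_ensure_glpe_nogate_in_groups_py baselines ablations out) := by unfold Spec_ensure_glpe_nogate_in_groups_py; infer_instance

-- ===== CLAIM (what is proved, stated in full; the proofs are below) =====
def Claim_equal_ensure_glpe_nogate_in_groups_py : Prop := ∀ (baselines : List String) (ablations : List String), Dom_ensure_glpe_nogate_in_groups_py baselines ablations → Spec_ensure_glpe_nogate_in_groups_py baselines ablations (ensure_glpe_nogate_in_groups_py baselines ablations)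

-- ===== LEMMAS AND PROOFS =====

-- move-to-front on the key list: erase-then-insert drops the old slot and appends
theorem pvMtfKeys (d : PySem.Dict String (Option Unit)) (h : String) :
    ((d.erase h).insert h (none : Option Unit)).keys
      = d.keys.filter (fun k => k != h) ++ [h] := by
  simp only [PySem.Dict.keys, PySem.Dict.insert, PySem.Dict.contains, PySem.Dict.erase,
    List.any_filter, Bool.not_and_self, List.any_eq_true, Bool.false_eq_true, and_false,
    exists_const, ↓reduceIte, List.map_append, List.map_cons, List.map_nil,
    List.append_cancel_right_eq]
  induction d.items with
  | nil => rfl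
  | cons p t ih => by_cases hp : p.1 = h <;> simp [hp, ih]

-- the dict move-to-front fold, read through reversed keys, is the list-rebuild fold
theorem pvFoldMtf_keys_rev (l : List String) (d : PySem.Dict String (Option Unit)) :
    ((l.foldl (fun mtf head => if head == "" then mtf
        else (PySem.Dict.erase mtf head).insert head (none : Option Unit)) d).keys).reverse
      = l.foldl (fun out head => if head == "" then out
          else head :: out.filter (fun k => k != head)) d.keys.reverse := by
  induction l generalizing d with
  | nil => rfl
  | cons h t ih =>
    by_cases hh : h = ""
    · simpa [hh] using ih d
    · have hb : (h == "") = false := by simpa using hh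
      simp only [List.foldl_cons, hb, Bool.false_eq_true, if_false]
      rw [ih ((d.erase h).insert h (none : Option Unit))]
      simp [pvMtfKeys, List.filter_reverse]

-- hence pvDedupBack is the back-to-front list rebuild
theorem pvDedupBack_eq_foldl (ks : List String) :
    pvDedupBack ks = ks.reverse.foldl
      (fun out head => if head == "" then out else head :: out.filter (fun k => k != head)) [] := by
  simpa [pvDedupBack] using pvFoldMtf_keys_rev ks.reverse PySem.Dict.empty

-- the "new part" that a left-to-right seen-set dedup starting from seen = acc appends
def pvNewf (acc : List String) : List String → List String
  | [] => []
  | k :: t => if k ∈ acc then pvNewf acc t else k :: pvNewf (acc ++ [k]) t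

theorem pvFoldlAdd_eq_newf (ks : List String) (acc : List String) :
    ks.foldl PySem.Set.add acc = acc ++ pvNewf acc ks := by
  induction ks generalizing acc with
  | nil => simp [pvNewf]
  | cons k t ih =>
    by_cases hk : k ∈ acc
    · simpa [pvNewf, hk, PySem.Set.add] using ih acc
    · simpa [pvNewf, hk, PySem.Set.add] using ih (acc ++ [k])

theorem pvNewf_not_mem (t : List String) (acc : List String) (x : String) (hx : x ∈ acc) :
    x ∉ pvNewf acc t := by
  induction t generalizing acc with
  | nil => simp [pvNewf]
  | cons k t ih =>
    by_cases hk : k ∈ acc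
    · simpa [pvNewf, hk] using ih acc hx
    · have hxk : x ≠ k := fun h => hk (h ▸ hx)
      have : x ∉ pvNewf (acc ++ [k]) t := ih (acc ++ [k]) (by simp [hx])
      simp [pvNewf, hk, hxk, this]

theorem pvNewf_congr (t : List String) (acc acc' : List String)
    (h : ∀ x, x ∈ acc ↔ x ∈ acc') : pvNewf acc t = pvNewf acc' t := by
  induction t generalizing acc acc' with
  | nil => simp [pvNewf]
  | cons k t ih =>
    by_cases hk : k ∈ acc
    · have hk' : k ∈ acc' := (h k).mp hk
      simpa [pvNewf, hk, hk'] using ih acc acc' h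
    · have hk' : k ∉ acc' := fun hm => hk ((h k).mpr hm)
      have := ih (acc ++ [k]) (acc' ++ [k]) (by intro x; simp [h x])
      simp [pvNewf, hk, hk', this]

theorem pvNewf_snoc (t : List String) (acc : List String) (h : String) (hh : h ∉ acc) :
    pvNewf (acc ++ [h]) t = (pvNewf acc t).filter (fun k => k != h) := by
  induction t generalizing acc with
  | nil => simp [pvNewf]
  | cons k t ih =>
    by_cases hk : k ∈ acc
    · have hk' : k ∈ acc ++ [h] := by simp [hk]
      simpa [pvNewf, hk, hk'] using ih acc hh
    · by_cases hkh : k = h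
      · subst hkh
        have hk' : k ∈ acc ++ [k] := by simp
        have hnm : ∀ x ∈ pvNewf (acc ++ [k]) t, (x != k) = true := by
          intro x hx
          have : x ≠ k := by
            intro hxk; exact pvNewf_not_mem t (acc ++ [k]) x (by simp [hxk]) (hxk ▸ hx)
          simpa using this
        simp [pvNewf, hk, hk', List.filter_eq_self.mpr hnm]
      · have hk' : k ∉ acc ++ [h] := by simp [hk, hkh]
        have hh' : h ∉ acc ++ [k] := by
          simp only [List.mem_append, List.mem_singleton]
          exact fun hc => hc.elim hh (fun he => hkh he.symm)
        have h1 := ih (acc ++ [k]) hh'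
        have h2 : pvNewf (acc ++ [h] ++ [k]) t = pvNewf (acc ++ [k] ++ [h]) t :=
          pvNewf_congr t _ _ (by intro x; simp; tauto)
        have e1 : pvNewf (acc ++ [h]) (k :: t) = k :: pvNewf (acc ++ [h] ++ [k]) t := by
          simp [pvNewf, hk']
        have e2 : pvNewf acc (k :: t) = k :: pvNewf (acc ++ [k]) t := by
          simp [pvNewf, hk]
        rw [e1, e2, h2, h1, List.filter_cons]
        simp [hkh]

theorem pvDedupBack_eq_foldr (ks : List String) :
    pvDedupBack ks = ks.foldr
      (fun head out => if head == "" then out else head :: out.filter (fun k => k != head)) [] := by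
  simp [pvDedupBack_eq_foldl, List.foldl_reverse]

theorem pvDedupBack_eq_newf (ks : List String) :
    pvDedupBack ks = pvNewf [] (ks.filter (fun k => k != "")) := by
  induction ks with
  | nil => rfl
  | cons k t ih =>
    rw [pvDedupBack_eq_foldr, List.foldr_cons, ← pvDedupBack_eq_foldr, ih]
    by_cases hk : k = ""
    · simp [hk]
    · have hs := pvNewf_snoc (t.filter (fun k => k != "")) [] k (by simp)
      simp only [List.nil_append] at hs
      simp [hk, pvNewf, hs]

-- A keeps seen = out (same elements appended at the same moments), and one phase-1 step is Set.add
-- on the normalized key when it is nonempty.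
theorem pvLoopA_diag (xs : List String) (acc : PySem.Set String) :
    pvLoopA xs (acc, acc) =
      (((xs.map (fun m => PySem.Str.lower (PySem.Str.strip m))).filter
          (fun k => k != "")).foldl PySem.Set.add acc,
       ((xs.map (fun m => PySem.Str.lower (PySem.Str.strip m))).filter
          (fun k => k != "")).foldl PySem.Set.add acc) := by
  induction xs generalizing acc with
  | nil => rfl
  | cons m xs ih =>
    simp only [pvLoopA, List.foldl_cons, List.map_cons, List.filter_cons] at *
    by_cases he : PySem.Str.lower (PySem.Str.strip m) = ""
    · simpa [he] using ih acc
    · by_cases hm : PySem.Str.lower (PySem.Str.strip m) ∈ acc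
      · have hadd : PySem.Set.add acc (PySem.Str.lower (PySem.Str.strip m)) = acc := by
          simp [PySem.Set.add, hm]
        simpa [he, hm, hadd, PySem.Set.contains] using ih acc
      · have hadd : PySem.Set.add acc (PySem.Str.lower (PySem.Str.strip m))
            = acc ++ [PySem.Str.lower (PySem.Str.strip m)] := by
          simp [PySem.Set.add, hm]
        simpa [he, hm, hadd, PySem.Set.contains] using ih (acc ++ [PySem.Str.lower (PySem.Str.strip m)])

-- the ensure step on a diagonal state is Set.add on both components
theorem pvEnsure_diag (r : List String) (k : String) :
    pvEnsure (r, r) k = (PySem.Set.add r k, PySem.Set.add r k) := by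
  by_cases hm : k ∈ r
  · simp [pvEnsure, hm, PySem.Set.add, PySem.Set.contains]
  · simp [pvEnsure, hm, PySem.Set.add, PySem.Set.contains]

-- B on one group equals A's list-with-seen-set value: both are foldl Set.add over the
-- nonempty normalized keys followed by the two required keys.
theorem pvGroup_eq (xs : List String) :
    pvDedupBack ((xs.map (fun m => PySem.Str.lower (PySem.Str.strip m))) ++ ["glpe", "glpe_nogate"]) =
      PySem.Set.add (PySem.Set.add
        (((xs.map (fun m => PySem.Str.lower (PySem.Str.strip m))).filter
            (fun k => k != "")).foldl PySem.Set.add []) "glpe") "glpe_nogate" := by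
  rw [pvDedupBack_eq_newf]
  have hfa : (((xs.map (fun m => PySem.Str.lower (PySem.Str.strip m))) ++
      ["glpe", "glpe_nogate"]).filter (fun k => k != "")) =
      ((xs.map (fun m => PySem.Str.lower (PySem.Str.strip m))).filter (fun k => k != ""))
        ++ ["glpe", "glpe_nogate"] := by
    simp [List.filter_append]
  rw [hfa]
  have h2 := pvFoldlAdd_eq_newf
    (((xs.map (fun m => PySem.Str.lower (PySem.Str.strip m))).filter (fun k => k != ""))
      ++ ["glpe", "glpe_nogate"]) []
  simp only [List.nil_append] at h2
  rw [← h2, List.foldl_append]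
  simp [List.foldl]

-- ===== VERDICT (by name: the statement is the Claim_ definition above) =====
theorem ensure_glpe_nogate_in_groups_py_spec : Claim_equal_ensure_glpe_nogate_in_groups_py := by
  intro baselines ablations _
  unfold Spec_ensure_glpe_nogate_in_groups_py ensure_glpe_nogate_in_groups_py
    ensure_glpe_nogate_in_groups_py_alt
  have hb := pvLoopA_diag baselines []
  have ha := pvLoopA_diag ablations []
  have hempty : (PySem.Set.empty : PySem.Set String) = ([] : List String) := rfl
  simp only [hempty, hb, ha, List.foldl_cons, List.foldl_nil, pvEnsure_diag, pvGroup_eq]
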